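-- pv_equiv track=rewrite | github.com/pacho530/EjercicioValidadorClave | validadorclave/modelo/validador.py | contiene_calisto
-- ===== SOURCE A (Python) =====
-- def contiene_calisto(clave: str) -> bool:
--     palabra = "calisto"
--     for i in range(len(clave) - len(palabra) + 1):
--         subcadena = clave[i:i+len(palabra)]
--         if subcadena.lower() == palabra:
--             mayus = sum(1 for c in subcadena if c.isupper())
--             if 1 < mayus < len(palabra):
--                 return True
--     return False
-- ===== SOURCE B (Python) =====
-- def contiene_calisto(clave: str) -> bool:
--     palabra = "calisto"
--     estado = 0
--     mayus = 0
--     for c in clave: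
--         l = c.lower()
--         if l == palabra[estado]:
--             estado += 1
--             if c.isupper():
--                 mayus += 1
--         elif l == "c":
--             estado = 1
--             mayus = 1 if c.isupper() else 0
--         else:
--             estado = 0
--             mayus = 0
--         if estado == len(palabra):
--             if 1 < mayus < len(palabra):
--                 return True
--             estado = 0
--             mayus = 0
--     return False
-- ===== Notes on version B (the rewrite author's own statement) =====
-- stated objective: alternative
-- what changed: Replaces A's slide-and-slice scan (a fresh 7-char slice lowered and compared at every index, then a per-slice uppercase recount) by a single-pass KMP-style automaton over the characters: a match-progress state and a running uppercase count are updated per character, with no slicing and no index arithmetic; restart-on-mismatch is a plain reset because 'calisto' has no self-overlap and 'c' occurs only at its first position.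
import Mathlib
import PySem

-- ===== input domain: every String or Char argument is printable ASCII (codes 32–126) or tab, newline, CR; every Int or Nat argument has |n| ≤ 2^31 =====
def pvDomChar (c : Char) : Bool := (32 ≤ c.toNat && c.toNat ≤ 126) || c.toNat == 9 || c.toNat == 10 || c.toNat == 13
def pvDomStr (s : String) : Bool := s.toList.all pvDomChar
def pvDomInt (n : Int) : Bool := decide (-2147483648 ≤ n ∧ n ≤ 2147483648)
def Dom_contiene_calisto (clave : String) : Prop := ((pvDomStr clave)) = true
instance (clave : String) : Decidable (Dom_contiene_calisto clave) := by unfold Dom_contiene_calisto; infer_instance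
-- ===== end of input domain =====

-- B replaces A's slide-and-slice window scan by a single-pass KMP-style automaton
-- (match-progress state + running uppercase count); same return value, no speed claim.

-- ===== PORT A =====
def contiene_calisto (clave : String) : Bool :=
  let palabra := "calisto"
  (PySem.List.pyRange 0 (PySem.Str.len clave - PySem.Str.len palabra + 1) 1).any (fun i =>
    let subcadena := PySem.Str.slice clave (some i) (some (i + PySem.Str.len palabra))
    if PySem.Str.lower subcadena = palabra then
      let mayus : Int := subcadena.toList.foldl
        (fun acc c => if PySem.Chars.isupper c then acc + 1 else acc) 0
      decide (1 < mayus ∧ mayus < PySem.Str.len palabra)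
    else false)

-- ===== PORT B =====
-- the characters of "calisto" (Python indexes palabra[estado] on this string)
def pvPat : List Char := "calisto".toList

def pvUp (c : Char) : Int := if PySem.Chars.isupper c then 1 else 0

-- the for-loop of Source B: structural recursion over the characters, carrying
-- (estado, mayus); the early `return True` is the `true` leaf.
def pvBGo : List Char → Nat → Int → Bool
  | [], _, _ => false
  | c :: rest, estado, mayus =>
    -- l = c.lower(); the three-way branch updates (estado, mayus)
    let p : Nat × Int :=
      if PySem.List.pyGet? pvPat (estado : Int) = some (PySem.Chars.lowerChar c) then
        (estado + 1, mayus + pvUp c)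
      else if PySem.Chars.lowerChar c = 'c' then (1, pvUp c)
      else (0, 0)
    -- if estado == len(palabra): qualify or reset
    if p.1 = 7 then
      (if 1 < p.2 ∧ p.2 < 7 then true else pvBGo rest 0 0)
    else pvBGo rest p.1 p.2

def contiene_calisto_alt (clave : String) : Bool := pvBGo clave.toList 0 0

-- ===== PRECONDITION & SPEC =====
def Spec_contiene_calisto (clave : String) (out : Bool) : Prop := out = contiene_calisto_alt clave
instance (clave : String) (out : Bool) : Decidable (Spec_contiene_calisto clave out) := by unfold Spec_contiene_calisto; infer_instance

-- ===== CLAIM (what is proved, stated in full; the proofs are below) =====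
def Claim_equal_contiene_calisto : Prop := ∀ (clave : String), Dom_contiene_calisto clave → Spec_contiene_calisto clave (contiene_calisto clave)

-- ===== LEMMAS AND PROOFS =====

-- uppercase count of a window
def pvCnt (l : List Char) : Int := (l.countP PySem.Chars.isupper : Int)

-- "the window starting here qualifies" (A's per-index test, head-anchored)
def pvGood (cs : List Char) : Bool :=
  decide (PySem.Chars.lower (cs.take 7) = pvPat) &&
  decide (1 < pvCnt (cs.take 7) ∧ pvCnt (cs.take 7) < 7)

-- "a pending partial match (k chars matched, u uppercase so far) completes and qualifies"
def pvPend (cs : List Char) (k : Nat) (u : Int) : Bool :=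
  decide (pvPat.drop k <+: PySem.Chars.lower cs) &&
  decide (1 < u + pvCnt (cs.take (7 - k)) ∧ u + pvCnt (cs.take (7 - k)) < 7)

-- "some window in cs qualifies"
def pvAnyB : List Char → Bool
  | [] => false
  | c :: rest => pvGood (c :: rest) || pvAnyB rest

theorem pvPat_len : pvPat.length = 7 := by decide

theorem pvCnt_nil : pvCnt [] = 0 := by simp [pvCnt]

theorem pvCnt_cons (c : Char) (l : List Char) : pvCnt (c :: l) = pvUp c + pvCnt l := by
  simp [pvCnt, pvUp, List.countP_cons]
  split_ifs <;> ring

theorem pvLower_take (cs : List Char) (n : Nat) :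
    PySem.Chars.lower (cs.take n) = (PySem.Chars.lower cs).take n := by
  simp [PySem.Chars.lower, List.map_take]

theorem pvGood_prefix (cs : List Char) :
    (PySem.Chars.lower (cs.take 7) = pvPat) ↔ pvPat <+: PySem.Chars.lower cs := by
  rw [pvLower_take, List.prefix_iff_eq_take, pvPat_len, eq_comm]

theorem pvGood_eq_pend0 (cs : List Char) : pvGood cs = pvPend cs 0 0 := by
  simp only [pvGood, pvPend, List.drop_zero, Nat.sub_zero, zero_add]
  rw [decide_eq_decide.mpr (pvGood_prefix cs)]

theorem pvGood_or_any (cs : List Char) : (pvGood cs || pvAnyB cs) = pvAnyB cs := by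
  cases cs with
  | nil => decide
  | cons c rest => simp [pvAnyB, - Bool.or_assoc]

theorem pvPatAt (k : Nat) (hk : k ≤ 6) :
    PySem.List.pyGet? pvPat (k : Int) = some (pvPat.getD k ' ') := by
  interval_cases k <;> rfl

theorem pvPat_drop (k : Nat) (hk : k ≤ 6) :
    pvPat.drop k = pvPat.getD k ' ' :: pvPat.drop (k + 1) := by
  interval_cases k <;> rfl

theorem pvPatAt_ne_c (k : Nat) (h1 : 1 ≤ k) (h6 : k ≤ 6) : pvPat.getD k ' ' ≠ 'c' := by
  interval_cases k <;> decide

theorem pvPend_seven (cs : List Char) (u : Int) :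
    pvPend cs 7 u = decide (1 < u ∧ u < 7) := by
  simp [pvPend, show pvPat.drop 7 = ([] : List Char) from rfl, pvCnt_nil]

theorem pvPend_cons (c : Char) (rest : List Char) (k : Nat) (u : Int) (hk : k ≤ 6) :
    pvPend (c :: rest) k u =
      (decide (PySem.Chars.lowerChar c = pvPat.getD k ' ') && pvPend rest (k + 1) (u + pvUp c)) := by
  have h7 : 7 - k = (6 - k) + 1 := by omega
  have h6 : 6 - k = 7 - (k + 1) := by omega
  simp only [pvPend, pvPat_drop k hk, PySem.Chars.lower, List.map_cons, h7, List.take_succ_cons,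
    pvCnt_cons, h6, List.cons_prefix_cons, Bool.decide_and, Bool.and_assoc, ← add_assoc]
  by_cases hp : PySem.Chars.lowerChar c = pvPat.getD k ' '
  · simp only [hp]
    rfl
  · rw [decide_eq_false hp, decide_eq_false (fun h => hp h.symm)]
    simp

-- the loop invariant: with k chars pending (u uppers among them; state 0 ⇒ count 0),
-- the automaton succeeds iff the pending match completes and qualifies or some window does
theorem pvB_go (cs : List Char) : ∀ (k : Nat) (u : Int), k ≤ 6 → (k = 0 → u = 0) →
    pvBGo cs k u = (pvPend cs k u || pvAnyB cs) := by
  induction cs with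
  | nil =>
    intro k u hk _
    have hd : pvPat.drop k ≠ [] := by
      intro h
      have := congrArg List.length h
      simp [pvPat_len] at this
      omega
    simp [pvBGo, pvAnyB, pvPend, List.prefix_nil, hd, PySem.Chars.lower]
  | cons c rest ih =>
    intro k u hk h0
    have hpend := pvPend_cons c rest k u hk
    by_cases h1 : PySem.List.pyGet? pvPat (k : Int) = some (PySem.Chars.lowerChar c)
    · have hpk : PySem.Chars.lowerChar c = pvPat.getD k ' ' := by
        rw [pvPatAt k hk] at h1
        exact (Option.some.injEq _ _ ▸ h1).symm
      rw [hpend, decide_eq_true hpk, Bool.true_and]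
      by_cases h7 : k + 1 = 7
      · have hk6 : k = 6 := by omega
        subst hk6
        by_cases hc : 1 < u + pvUp c ∧ u + pvUp c < 7
        · simp only [pvBGo, if_pos h1]
          rw [if_pos trivial, if_pos hc, pvPend_seven, decide_eq_true hc]
          simp
        · have hrest := ih 0 0 (by omega) (fun _ => rfl)
          rw [← pvGood_eq_pend0] at hrest
          simp only [pvBGo, if_pos h1]
          rw [if_pos trivial, if_neg hc, hrest, pvGood_or_any, pvPend_seven,
            decide_eq_false hc, Bool.false_or, pvAnyB]
          have hgood : pvGood (c :: rest) = false := by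
            rw [pvGood_eq_pend0, pvPend_cons c rest 0 0 (by omega)]
            exact by rw [decide_eq_false (show PySem.Chars.lowerChar c ≠ pvPat.getD 0 ' ' from by
              rw [hpk]; decide), Bool.false_and]
          rw [hgood, Bool.false_or]
      · have hk1 : k + 1 ≤ 6 := by omega
        have hrest := ih (k + 1) (u + pvUp c) hk1 (by omega)
        simp only [pvBGo, if_pos h1, if_neg h7]
        rw [hrest, pvAnyB]
        by_cases hk0 : k = 0
        · subst hk0
          rw [h0 rfl]
          rw [pvGood_eq_pend0, pvPend_cons c rest 0 0 (by omega), decide_eq_true hpk,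
            Bool.true_and]
          rw [show (0 : Int) + pvUp c = u + pvUp c from by rw [h0 rfl]]
          rw [← Bool.or_assoc, Bool.or_self]
        · have hgood : pvGood (c :: rest) = false := by
            rw [pvGood_eq_pend0, pvPend_cons c rest 0 0 (by omega)]
            exact by rw [decide_eq_false (show PySem.Chars.lowerChar c ≠ pvPat.getD 0 ' ' from by
              rw [hpk, show pvPat.getD 0 ' ' = 'c' from rfl]
              exact pvPatAt_ne_c k (by omega) hk), Bool.false_and]
          rw [hgood, Bool.false_or]
    · have hne : PySem.Chars.lowerChar c ≠ pvPat.getD k ' ' := by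
        intro h
        exact h1 (by rw [pvPatAt k hk, h])
      have hpf : pvPend (c :: rest) k u = false := by
        rw [hpend, decide_eq_false hne, Bool.false_and]
      by_cases h2 : PySem.Chars.lowerChar c = 'c'
      · have hk0 : k ≠ 0 := by
          intro h
          subst h
          exact hne (by rw [h2]; rfl)
        have hrest := ih 1 (pvUp c) (by omega) (by omega)
        simp only [pvBGo, if_neg h1, if_pos h2]
        rw [if_neg (by decide : ¬ (1 = 7)), hrest, pvAnyB, hpf, Bool.false_or]
        have hgood : pvGood (c :: rest) = pvPend rest 1 (pvUp c) := by
          rw [pvGood_eq_pend0, pvPend_cons c rest 0 0 (by omega), h2,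
            decide_eq_true (show ('c' : Char) = pvPat.getD 0 ' ' from rfl), Bool.true_and]
          norm_num
        rw [hgood]
      · have hrest := ih 0 0 (by omega) (fun _ => rfl)
        rw [← pvGood_eq_pend0] at hrest
        simp only [pvBGo, if_neg h1, if_neg h2]
        rw [if_neg (by decide : ¬ (0 = 7)), hrest, pvGood_or_any, pvAnyB, hpf, Bool.false_or]
        have hgood : pvGood (c :: rest) = false := by
          rw [pvGood_eq_pend0, pvPend_cons c rest 0 0 (by omega),
            decide_eq_false (show PySem.Chars.lowerChar c ≠ pvPat.getD 0 ' ' from by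
              rw [show pvPat.getD 0 ' ' = 'c' from rfl]; exact h2), Bool.false_and]
        rw [hgood, Bool.false_or]

theorem pvAnyB_eq (cs : List Char) :
    pvAnyB cs = (List.range cs.length).any (fun i => pvGood (cs.drop i)) := by
  induction cs with
  | nil => simp [pvAnyB]
  | cons c rest ih =>
    simp only [pvAnyB, List.length_cons, List.range_succ_eq_map, List.any_cons, List.any_map]
    rw [ih,
      show ((fun i => pvGood (List.drop i (c :: rest))) ∘ Nat.succ)
          = (fun i => pvGood (List.drop i rest)) from funext fun i => rfl]
    rfl

theorem pvGood_short (cs : List Char) (i : Nat) (h : cs.length < i + 7) :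
    pvGood (cs.drop i) = false := by
  have hlen : (PySem.Chars.lower ((cs.drop i).take 7)).length ≠ pvPat.length := by
    simp [PySem.Chars.lower, pvPat_len]
    omega
  simp only [pvGood, Bool.and_eq_false_iff, decide_eq_false_iff_not]
  exact Or.inl fun hh => hlen (by rw [hh])

theorem pvAny_range_cut (cs : List Char) :
    (List.range cs.length).any (fun i => pvGood (cs.drop i)) =
      (List.range (cs.length - 6)).any (fun i => pvGood (cs.drop i)) := by
  conv_lhs => rw [show cs.length = (cs.length - 6) + (cs.length - (cs.length - 6)) from by omega,
    List.range_add, List.any_append]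
  have h2 : ((List.range (cs.length - (cs.length - 6))).map (cs.length - 6 + ·)).any
      (fun i => pvGood (cs.drop i)) = false := by
    rw [List.any_eq_false]
    intro i hi
    simp only [List.mem_map, List.mem_range] at hi
    obtain ⟨j, hj, rfl⟩ := hi
    rw [Bool.not_eq_true]
    exact pvGood_short cs _ (by omega)
  rw [h2, Bool.or_false]

theorem pvSlice7 (clave : String) (i : Nat) :
    (PySem.Str.slice clave (some (i : Int)) (some ((i : Int) + 7))).toList =
      (clave.toList.drop i).take 7 := by
  rw [PySem.Str.toList_slice, PySem.Chars.slice_eq_listSlice]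
  exact_mod_cast PySem.List.slice_natCast_add clave.toList i 7

theorem pvA_norm (clave : String) :
    contiene_calisto clave =
      (List.range (clave.toList.length - 6)).any (fun i => pvGood (clave.toList.drop i)) := by
  simp only [contiene_calisto]
  rw [PySem.List.pyRange_of_pos _ _ (by norm_num : (0:Int) < 1)]
  have hlen : PySem.Str.len clave = (clave.toList.length : Int) := by
    simp [PySem.Str.len_eq]
  have hlen7 : PySem.Str.len "calisto" = 7 := by decide
  rw [hlen, hlen7]
  have hcnt : (if (0:Int) < (clave.toList.length : Int) - 7 + 1
      then (((clave.toList.length : Int) - 7 + 1 - 0 + 1 - 1) / 1).toNat else 0)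
      = clave.toList.length - 6 := by
    split_ifs with h
    · omega
    · omega
  rw [hcnt, List.any_map]
  refine List.any_congr rfl fun i => ?_
  have harg : (0 : Int) + 1 * (i : Int) = (i : Int) := by ring
  simp only [Function.comp, harg]
  have hsl := pvSlice7 clave i
  have hcond : (PySem.Str.lower (PySem.Str.slice clave (some (i:Int)) (some ((i:Int) + 7))) = "calisto")
      ↔ (PySem.Chars.lower ((clave.toList.drop i).take 7) = pvPat) := by
    rw [String.ext_iff, PySem.Str.toList_lower, hsl]
    rfl
  split_ifs with h1
  · have hm := hcond.mp h1
    rw [hsl, PySem.List.foldl_if_add_one]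
    simp only [pvGood, hm, decide_true, Bool.true_and]
    rw [show ((0 : Int) + (((clave.toList.drop i).take 7).countP PySem.Chars.isupper : Int))
        = pvCnt ((clave.toList.drop i).take 7) from by rw [pvCnt]; ring]
  · symm
    simp only [pvGood, Bool.and_eq_false_iff, decide_eq_false_iff_not]
    exact Or.inl fun hh => h1 (hcond.mpr hh)

-- ===== VERDICT (by name: the statement is the Claim_ definition above) =====
theorem contiene_calisto_spec : Claim_equal_contiene_calisto := by
  intro clave _
  unfold Spec_contiene_calisto
  rw [pvA_norm]
  show _ = pvBGo clave.toList 0 0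
  rw [pvB_go clave.toList 0 0 (by omega) (fun _ => rfl), ← pvGood_eq_pend0,
    pvGood_or_any, pvAnyB_eq, pvAny_range_cut]
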